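-- pv_equiv track=rewrite | github.com/pratikkadam22/coding-practice | ctci/chapter8/13.py | createStack
-- ===== SOURCE A (Python) =====
-- def createStack(boxes):
--     boxes.sort(key = lambda x: -x[0])
--     memo = [0] * len(boxes)
--     max_height = 0
--     for i in range(len(boxes)):
--         height = helper(boxes, i, memo)
--         max_height = max(max_height, height)
--     return max_height
--
-- def helper(boxes, bottom_index, memo):
--     if bottom_index < len(boxes) and memo[bottom_index] > 0:
--         return memo[bottom_index]
--     prev_w, prev_h, prev_d = boxes[bottom_index]
--     max_height = 0
--     for i in range(bottom_index + 1, len(boxes)):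
--         w, h, d = boxes[i]
--         if prev_w > w and prev_h > h and prev_d > d:
--             height = helper(boxes, i, memo)
--             max_height = max(height, max_height)
--     max_height += prev_h
--     memo[bottom_index] = max_height
--     return max_height
-- ===== SOURCE B (Python) =====
-- def createStack(boxes):
--     boxes.sort(key=lambda x: -x[0])
--     # iterative DP over the suffix, scanning the sorted list back to front:
--     # for each box keep (box, best stack height with that box on the bottom)
--     suffix = []
--     ans = 0
--     for box in reversed(boxes):
--         w, h, d = box
--         best = 0
--         for (w2, h2, d2), v in suffix:
--             if w > w2 and h > h2 and d > d2:
--                 best = max(best, v)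
--         cur = h + best
--         suffix.append((box, cur))
--         ans = max(ans, cur)
--     return ans
-- ===== Notes on version B (the rewrite author's own statement) =====
-- stated objective: alternative
-- what changed: Replaces A's top-down recursive helper with a memo array (called once per start index from the outer loop) by a single iterative bottom-up DP pass that scans the sorted list back to front, maintaining a list of (box, best-height) pairs and a running maximum.
import Mathlib
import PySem

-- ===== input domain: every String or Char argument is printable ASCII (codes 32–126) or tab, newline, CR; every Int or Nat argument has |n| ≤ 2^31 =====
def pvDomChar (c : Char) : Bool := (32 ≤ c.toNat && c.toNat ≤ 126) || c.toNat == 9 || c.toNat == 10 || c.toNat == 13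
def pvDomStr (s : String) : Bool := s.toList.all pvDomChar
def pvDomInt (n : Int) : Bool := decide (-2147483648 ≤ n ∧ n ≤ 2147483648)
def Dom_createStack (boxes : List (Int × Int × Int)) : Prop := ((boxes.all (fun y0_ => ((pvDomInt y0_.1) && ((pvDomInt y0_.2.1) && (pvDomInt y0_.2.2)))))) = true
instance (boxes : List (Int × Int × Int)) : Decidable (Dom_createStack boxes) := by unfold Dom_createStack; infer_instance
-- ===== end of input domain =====

-- B replaces A's recursive memoized helper with a single iterative bottom-up DP pass
-- over the same sorted order (alternative decomposition, same asymptotic cost).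
-- Both Pythons sort `boxes` in place; the equivalence proved here is about the return value.

-- ===== PORT A =====
-- helper(boxes, bottom_index, memo): returns (value, updated memo).
-- The final `else` branch (bottom_index out of range) is where Python would raise an
-- IndexError on boxes[bottom_index]; it is unreachable from createStack (totality guard).
mutual
def helperA (ys : List (Int × Int × Int)) (bi : Nat) (memo : List Int) : Int × List Int :=
  if bi < ys.length ∧ memo.getD bi 0 > 0 then
    (memo.getD bi 0, memo)
  else if hb : bi < ys.length then
    let prev := ys[bi]
    let r := loopA ys prev (bi + 1) memo 0
    let res := r.1 + prev.2.1
    (res, r.2.set bi res)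
  else (0, memo)
termination_by (ys.length - bi, 0)

-- the `for i in range(bottom_index+1, len(boxes))` loop of helper, acc = max_height
def loopA (ys : List (Int × Int × Int)) (prev : Int × Int × Int) (i : Nat)
    (memo : List Int) (acc : Int) : Int × List Int :=
  if hi : i < ys.length then
    if prev.1 > (ys[i]).1 ∧ prev.2.1 > (ys[i]).2.1 ∧ prev.2.2 > (ys[i]).2.2 then
      let r := helperA ys i memo
      loopA ys prev (i + 1) r.2 (max r.1 acc)
    else loopA ys prev (i + 1) memo acc
  else (acc, memo)
termination_by (ys.length - i, 1)
end

-- the `for i in range(len(boxes))` loop of createStack, threading memo and max_height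
def outerA (ys : List (Int × Int × Int)) (i : Nat) (memo : List Int) (mh : Int) : Int :=
  if i < ys.length then
    let r := helperA ys i memo
    outerA ys (i + 1) r.2 (max mh r.1)
  else mh
termination_by ys.length - i

def createStack (boxes : List (Int × Int × Int)) : Int :=
  let ys := PySem.List.sorted boxes (fun x => -x.1) false
  outerA ys 0 (List.replicate ys.length 0) 0

-- ===== PORT B =====
-- one step of B's outer loop over reversed(boxes): state = (suffix, ans)
def altStep (st : List ((Int × Int × Int) × Int) × Int) (box : Int × Int × Int) :
    List ((Int × Int × Int) × Int) × Int :=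
  let best := st.1.foldl
    (fun best p =>
      if box.1 > p.1.1 ∧ box.2.1 > p.1.2.1 ∧ box.2.2 > p.1.2.2 then max best p.2 else best) 0
  let cur := box.2.1 + best
  (st.1 ++ [(box, cur)], max st.2 cur)

def createStack_alt (boxes : List (Int × Int × Int)) : Int :=
  let ys := PySem.List.sorted boxes (fun x => -x.1) false
  (ys.reverse.foldl altStep ([], 0)).2

-- ===== PRECONDITION & SPEC =====
def Spec_createStack (boxes : List (Int × Int × Int)) (out : Int) : Prop := out = createStack_alt boxes
instance (boxes : List (Int × Int × Int)) (out : Int) : Decidable (Spec_createStack boxes out) := by unfold Spec_createStack; infer_instance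

-- ===== CLAIM (what is proved, stated in full; the proofs are below) =====
def Claim_equal_createStack : Prop := ∀ (boxes : List (Int × Int × Int)), Dom_createStack boxes → Spec_createStack boxes (createStack boxes)

-- ===== LEMMAS AND PROOFS =====

-- pure specification: for each suffix head, the pair (box, best height with it on the bottom)
def bestD (b : Int × Int × Int) (a : Int) (l : List ((Int × Int × Int) × Int)) : Int :=
  l.foldl (fun best p =>
    if b.1 > p.1.1 ∧ b.2.1 > p.1.2.1 ∧ b.2.2 > p.1.2.2 then max best p.2 else best) a

def Hlist : List (Int × Int × Int) → List ((Int × Int × Int) × Int)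
  | [] => []
  | b :: rest => (b, b.2.1 + bestD b 0 (Hlist rest)) :: Hlist rest

def Hval (ys : List (Int × Int × Int)) (j : Nat) : Int :=
  (((Hlist ys)[j]?).map Prod.snd).getD 0

def ansAux (a : Int) (l : List ((Int × Int × Int) × Int)) : Int :=
  l.foldl (fun a p => max a p.2) a

def InvM (ys : List (Int × Int × Int)) (memo : List Int) : Prop :=
  memo.length = ys.length ∧ ∀ j : Nat, memo.getD j 0 > 0 → memo.getD j 0 = Hval ys j

theorem foldl_out {α β : Type} (f : α → β → α)
    (h : ∀ a x y, f (f a x) y = f (f a y) x) :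
    ∀ (l : List β) (a : α) (x : β), f (l.foldl f a) x = l.foldl f (f a x) := by
  intro l
  induction l with
  | nil => intro a x; rfl
  | cons y t ih => intro a x; simp only [List.foldl_cons]; rw [ih, h]

theorem foldl_reverse_comm {α β : Type} (f : α → β → α)
    (h : ∀ a x y, f (f a x) y = f (f a y) x) :
    ∀ (l : List β) (a : α), l.reverse.foldl f a = l.foldl f a := by
  intro l
  induction l with
  | nil => intro a; rfl
  | cons x t ih =>
    intro a
    simp only [List.reverse_cons, List.foldl_append, List.foldl_cons, List.foldl_nil]
    rw [ih, foldl_out f h]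

theorem Hlist_length (ys : List (Int × Int × Int)) : (Hlist ys).length = ys.length := by
  induction ys with
  | nil => rfl
  | cons b rest ih => simp [Hlist, ih]

theorem Hlist_drop : ∀ (k : Nat) (ys : List (Int × Int × Int)),
    Hlist (ys.drop k) = (Hlist ys).drop k := by
  intro k
  induction k with
  | zero => intro ys; rfl
  | succ k ih =>
    intro ys
    cases ys with
    | nil => rfl
    | cons b rest => simpa [Hlist] using ih rest

theorem Hval_eq (ys : List (Int × Int × Int)) (i : Nat) (hi : i < ys.length) :
    Hval ys i = ys[i].2.1 + bestD ys[i] 0 ((Hlist ys).drop (i + 1)) := by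
  have h1 : ys.drop i = ys[i] :: ys.drop (i + 1) := List.drop_eq_getElem_cons hi
  have h2 := Hlist_drop i ys
  have h3 := Hlist_drop (i + 1) ys
  rw [h1, Hlist, h3] at h2
  rw [Hval, ← List.head?_drop, ← h2]
  rfl

theorem Hlist_drop_cons (ys : List (Int × Int × Int)) (i : Nat) (hi : i < ys.length) :
    (Hlist ys).drop i = (ys[i], Hval ys i) :: (Hlist ys).drop (i + 1) := by
  have h1 : ys.drop i = ys[i] :: ys.drop (i + 1) := List.drop_eq_getElem_cons hi
  have h2 := Hlist_drop i ys
  have h3 := Hlist_drop (i + 1) ys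
  rw [h1, Hlist, h3] at h2
  rw [← h2, Hval_eq ys i hi]

theorem bestD_out (b : Int × Int × Int) (l : List ((Int × Int × Int) × Int)) (a : Int)
    (p : (Int × Int × Int) × Int) :
    bestD b a (p :: l) = if b.1 > p.1.1 ∧ b.2.1 > p.1.2.1 ∧ b.2.2 > p.1.2.2 then
      bestD b (max a p.2) l else bestD b a l := by
  simp only [bestD, List.foldl_cons]; split_ifs <;> rfl

theorem InvM_set (ys : List (Int × Int × Int)) (memo : List Int) (bi : Nat) (v : Int)
    (hinv : InvM ys memo) (hv : v = Hval ys bi) : InvM ys (memo.set bi v) := by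
  obtain ⟨hlen, hcoh⟩ := hinv
  refine ⟨by simpa using hlen, ?_⟩
  intro j hj
  by_cases hjb : j = bi
  · subst hjb
    by_cases hjl : j < memo.length
    · simp only [List.getD, List.getElem?_set_self (by simpa using hjl)] at hj ⊢
      simpa using hv
    · have : (memo.set j v).length ≤ j := by simpa using Nat.le_of_not_lt hjl
      rw [List.getD_eq_default _ _ (by omega)] at hj
      omega
  · rw [List.getD, List.getElem?_set_ne (by omega)] at hj ⊢
    exact hcoh j hj

theorem loopA_correct (ys : List (Int × Int × Int)) (prev : Int × Int × Int) (lo : Nat)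
    (hh : ∀ j memo', lo ≤ j → j < ys.length → InvM ys memo' →
      (helperA ys j memo').1 = Hval ys j ∧ InvM ys (helperA ys j memo').2) :
    ∀ (f i : Nat) (memo : List Int) (acc : Int), ys.length ≤ i + f → lo ≤ i → InvM ys memo →
      (loopA ys prev i memo acc).1 = bestD prev acc ((Hlist ys).drop i) ∧
      InvM ys (loopA ys prev i memo acc).2 := by
  intro f
  induction f with
  | zero =>
    intro i memo acc hf hlo hinv
    have hni : ¬ i < ys.length := by omega
    have hd : ((Hlist ys).drop i) = [] := by
      apply List.drop_eq_nil_of_le; rw [Hlist_length]; omega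
    rw [loopA, dif_neg hni, hd]
    exact ⟨rfl, hinv⟩
  | succ f ih =>
    intro i memo acc hf hlo hinv
    by_cases hi : i < ys.length
    · rw [loopA, dif_pos hi, Hlist_drop_cons ys i hi, bestD_out]
      by_cases hdom : prev.1 > (ys[i]).1 ∧ prev.2.1 > (ys[i]).2.1 ∧ prev.2.2 > (ys[i]).2.2
      · rw [if_pos hdom]
        simp only [if_pos hdom]
        obtain ⟨hv, hinv'⟩ := hh i memo hlo hi hinv
        have hrec := ih (i + 1) (helperA ys i memo).2 (max (helperA ys i memo).1 acc)
          (by omega) (by omega) hinv'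
        have hacc : max acc (Hval ys i) = max (helperA ys i memo).1 acc := by
          rw [hv, max_comm]
        rw [hacc]
        exact hrec
      · rw [if_neg hdom]
        simp only [if_neg hdom]
        exact ih (i + 1) memo acc (by omega) (by omega) hinv
    · have hd : ((Hlist ys).drop i) = [] := by
        apply List.drop_eq_nil_of_le; rw [Hlist_length]; omega
      rw [loopA, dif_neg hi, hd]
      exact ⟨rfl, hinv⟩

theorem helperA_correct (ys : List (Int × Int × Int)) :
    ∀ (f bi : Nat) (memo : List Int), ys.length ≤ bi + f → bi < ys.length → InvM ys memo →
      (helperA ys bi memo).1 = Hval ys bi ∧ InvM ys (helperA ys bi memo).2 := by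
  intro f
  induction f with
  | zero => intro bi memo hf hbi _; omega
  | succ f ih =>
    intro bi memo hf hbi hinv
    rw [helperA]
    by_cases hg : bi < ys.length ∧ memo.getD bi 0 > 0
    · rw [if_pos hg]
      exact ⟨hinv.2 bi hg.2, hinv⟩
    · rw [if_neg hg, dif_pos hbi]
      have hloop := loopA_correct ys ys[bi] (bi + 1)
        (fun j memo' hj hjn hinv' => ih j memo' (by omega) hjn hinv')
        f (bi + 1) memo 0 (by omega) (le_refl _) hinv
      simp only
      constructor
      · rw [hloop.1, Hval_eq ys bi hbi, add_comm]
      · exact InvM_set ys _ bi _ hloop.2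
          (by rw [hloop.1, Hval_eq ys bi hbi, add_comm])

theorem outerA_correct (ys : List (Int × Int × Int)) :
    ∀ (f i : Nat) (memo : List Int) (mh : Int), ys.length ≤ i + f → InvM ys memo →
      outerA ys i memo mh = ansAux mh ((Hlist ys).drop i) := by
  intro f
  induction f with
  | zero =>
    intro i memo mh hf hinv
    have hni : ¬ i < ys.length := by omega
    have hd : ((Hlist ys).drop i) = [] := by
      apply List.drop_eq_nil_of_le; rw [Hlist_length]; omega
    rw [outerA, if_neg hni, hd]; rfl
  | succ f ih =>
    intro i memo mh hf hinv
    by_cases hi : i < ys.length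
    · rw [outerA, if_pos hi, Hlist_drop_cons ys i hi]
      obtain ⟨hv, hinv'⟩ := helperA_correct ys ys.length i memo (by omega) hi hinv
      simp only [ansAux, List.foldl_cons]
      rw [ih (i + 1) _ _ (by omega) hinv', hv]
      rfl
    · have hd : ((Hlist ys).drop i) = [] := by
        apply List.drop_eq_nil_of_le; rw [Hlist_length]; omega
      rw [outerA, if_neg hi, hd]; rfl

theorem ansAux_out : ∀ (l : List ((Int × Int × Int) × Int)) (a x : Int),
    max (ansAux a l) x = ansAux (max a x) l := by
  intro l
  induction l with
  | nil => intro a x; rfl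
  | cons p t ih =>
    intro a x
    simp only [ansAux, List.foldl_cons] at *
    rw [ih, max_right_comm]

theorem altB_correct (ys : List (Int × Int × Int)) :
    ys.reverse.foldl altStep ([], 0) = ((Hlist ys).reverse, ansAux 0 (Hlist ys)) := by
  induction ys with
  | nil => rfl
  | cons b rest ih =>
    have hmaxc : ∀ (a : Int) (x y : (Int × Int × Int) × Int),
        max (max a x.2) y.2 = max (max a y.2) x.2 := by
      intro a x y; rw [max_right_comm]
    have hbestc : ∀ (a : Int) (x y : (Int × Int × Int) × Int),
        (fun best p => if b.1 > p.1.1 ∧ b.2.1 > p.1.2.1 ∧ b.2.2 > p.1.2.2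
          then max best p.2 else best)
          ((fun best p => if b.1 > p.1.1 ∧ b.2.1 > p.1.2.1 ∧ b.2.2 > p.1.2.2
            then max best p.2 else best) a x) y
        = (fun best p => if b.1 > p.1.1 ∧ b.2.1 > p.1.2.1 ∧ b.2.2 > p.1.2.2
          then max best p.2 else best)
          ((fun best p => if b.1 > p.1.1 ∧ b.2.1 > p.1.2.1 ∧ b.2.2 > p.1.2.2
            then max best p.2 else best) a y) x := by
      intro a x y; simp only; split_ifs <;> simp [max_right_comm]
    simp only [List.reverse_cons, List.foldl_append, List.foldl_cons, List.foldl_nil, ih]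
    have hbest : ((Hlist rest).reverse.foldl
        (fun best p => if b.1 > p.1.1 ∧ b.2.1 > p.1.2.1 ∧ b.2.2 > p.1.2.2
          then max best p.2 else best) 0) = bestD b 0 (Hlist rest) := by
      rw [foldl_reverse_comm _ hbestc]; rfl
    rw [Hlist]
    simp only [altStep, hbest, List.reverse_cons]
    rw [ansAux_out]
    simp only [ansAux, List.foldl_cons]

theorem InvM_replicate (ys : List (Int × Int × Int)) :
    InvM ys (List.replicate ys.length 0) := by
  refine ⟨by simp, ?_⟩
  intro j hj
  by_cases h : j < ys.length
  · simp [List.getD, h] at hj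
  · rw [List.getD_eq_default _ _ (by simpa using Nat.le_of_not_lt h)] at hj
    omega

-- ===== VERDICT (by name: the statement is the Claim_ definition above) =====
theorem createStack_spec : Claim_equal_createStack := by
  intro boxes _
  unfold Spec_createStack createStack createStack_alt
  simp only
  set ys := PySem.List.sorted boxes (fun x => -x.1) false with hys
  rw [outerA_correct ys ys.length 0 (List.replicate ys.length 0) 0 (by omega)
    (InvM_replicate ys), altB_correct ys, List.drop_zero]
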